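-- pv_equiv track=rewrite | github.com/MatiasBS027/TEC | I SEMESTRE/Introduccion a la Programacion/Tareas/TQ7/quiz7.py | diccionarioAMatriz
-- ===== SOURCE A (Python) =====
-- def diccionarioAMatriz(diccionario):
--     # Diccionario auxiliar para agrupar eventos por día
--     agrupados = {}
--     for categoria in diccionario:
--         for dia, descripcion in diccionario[categoria]:
--             if dia not in agrupados:
--                 agrupados[dia] = []
--             agrupados[dia].append(descripcion)
--     # Creamos una lista vacía para la matriz
--     matriz = []
--     # Recorremos cada clave y valor del diccionario 'agrupados'
--     for dia, descripciones in agrupados.items():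
--     # Creamos una lista con el día y la lista de descripciones
--         fila = [dia, descripciones]
--     # Agregamos esa fila a la matriz
--         matriz.append(fila)
--
--     return matriz
-- ===== SOURCE B (Python) =====
-- def diccionarioAMatriz(diccionario):
--     # No grouping dict at all: flatten the events, deduplicate the days in
--     # first-appearance order, then collect each day's descriptions by filtering.
--     eventos = [par for pares in diccionario.values() for par in pares]
--     dias = list(dict.fromkeys(dia for dia, _ in eventos))
--     return [[dia, [desc for d, desc in eventos if d == dia]] for dia in dias]
-- ===== Notes on version B (the rewrite author's own statement) =====
-- stated objective: alternative
-- what changed: A builds an auxiliary grouping dict incrementally and then converts it to rows; B uses no grouping structure at all: it flattens the events into one stream, deduplicates the days in first-appearance order, and produces each row by filtering the stream for that day's descriptions (nested scans instead of hash grouping).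
import Mathlib
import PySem

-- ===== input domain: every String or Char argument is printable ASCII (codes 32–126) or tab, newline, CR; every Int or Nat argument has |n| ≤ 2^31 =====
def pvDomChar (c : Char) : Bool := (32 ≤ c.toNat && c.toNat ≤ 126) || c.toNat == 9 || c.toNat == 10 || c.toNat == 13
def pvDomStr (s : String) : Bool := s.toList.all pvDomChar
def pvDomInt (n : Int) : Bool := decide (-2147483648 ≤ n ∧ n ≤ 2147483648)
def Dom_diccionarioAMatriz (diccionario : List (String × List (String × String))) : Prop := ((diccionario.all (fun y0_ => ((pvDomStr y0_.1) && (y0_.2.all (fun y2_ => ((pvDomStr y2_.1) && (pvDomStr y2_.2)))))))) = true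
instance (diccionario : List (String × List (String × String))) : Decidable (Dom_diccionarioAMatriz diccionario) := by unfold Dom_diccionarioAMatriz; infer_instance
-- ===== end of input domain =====

-- B drops A's incremental grouping dict entirely: it flattens the events, deduplicates the
-- days in first-appearance order, and builds each row by filtering the stream (objective: alternative).

-- ===== PORT A =====
def diccionarioAMatriz (diccionario : List (String × List (String × String))) : List (String × List String) :=
  let dct : PySem.Dict String (List (String × String)) := PySem.Dict.mk diccionario
  let agrupados : PySem.Dict String (List String) :=
    dct.keys.foldl (fun ag categoria =>
      (dct.getD categoria []).foldl (fun ag par =>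
        let ag1 := if ag.contains par.1 then ag else ag.insert par.1 []
        ag1.modify par.1 [] (fun ds => ds ++ [par.2])) ag)
      PySem.Dict.empty
  agrupados.items.foldl (fun matriz fila => matriz ++ [fila]) []

-- ===== PORT B =====
-- 'dict.fromkeys' dedup-in-order is ported as PySem.Set.ofList (distinct elements in first-appearance order)
def diccionarioAMatriz_alt (diccionario : List (String × List (String × String))) : List (String × List String) :=
  let eventos : List (String × String) := diccionario.flatMap (fun pares => pares.2)
  let dias : List String := PySem.Set.ofList (eventos.map (fun par => par.1))
  dias.map (fun dia => (dia, (eventos.filter (fun p => p.1 == dia)).map (fun p => p.2)))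

-- ===== PRECONDITION & SPEC =====
-- Pre_ excludes association lists with duplicate category keys: those do not represent any Python
-- dict argument (a Python dict cannot hold two equal keys), so the ports' behaviour there encodes
-- no Python behaviour at all.
def Pre_diccionarioAMatriz (diccionario : List (String × List (String × String))) : Prop :=
  (diccionario.map Prod.fst).Nodup
instance (diccionario : List (String × List (String × String))) : Decidable (Pre_diccionarioAMatriz diccionario) := by unfold Pre_diccionarioAMatriz; infer_instance
def pvWitness_diccionarioAMatriz : (List (String × List (String × String))) :=
  [("personal", [("lunes", "gym"), ("martes", "cine"), ("lunes", "leer")]), ("trabajo", [("martes", "junta")])]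

def Spec_diccionarioAMatriz (diccionario : List (String × List (String × String))) (out : List (String × List String)) : Prop := out = diccionarioAMatriz_alt diccionario
instance (diccionario : List (String × List (String × String))) (out : List (String × List String)) : Decidable (Spec_diccionarioAMatriz diccionario out) := by unfold Spec_diccionarioAMatriz; infer_instance

-- ===== CLAIM (what is proved, stated in full; the proofs are below) =====
def Claim_equal_diccionarioAMatriz : Prop := ∀ (diccionario : List (String × List (String × String))), Dom_diccionarioAMatriz diccionario → Pre_diccionarioAMatriz diccionario → Spec_diccionarioAMatriz diccionario (diccionarioAMatriz diccionario)

-- ===== LEMMAS AND PROOFS =====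

-- A's conditional-insert-then-append step is extensionally the modify-append step
theorem pvStepA_eq (ag : PySem.Dict String (List String)) (p : String × String) :
    (if ag.contains p.1 then ag else ag.insert p.1 []).modify p.1 [] (fun ds => ds ++ [p.2])
      = ag.modify p.1 [] (fun ds => ds ++ [p.2]) := by
  by_cases h : ag.contains p.1
  · rw [if_pos h]
  · rw [if_neg h]
    rw [PySem.Dict.modify, PySem.Dict.modify,
        PySem.Dict.getD_insert_self, PySem.Dict.insert_insert_self,
        PySem.Dict.getD_of_not_contains ag _ (by simpa using h)]

-- A's passes, characterised: the grouping dict's items are exactly B's rows over the flat stream.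
theorem pvA_eq (d : List (String × List (String × String)))
    (hnd : (d.map Prod.fst).Nodup) :
    diccionarioAMatriz d =
      (PySem.Set.ofList ((d.flatMap Prod.snd).map Prod.fst)).map
        (fun k => (k, ((d.flatMap Prod.snd).filter (fun p => p.1 == k)).map Prod.snd)) := by
  unfold diccionarioAMatriz
  rw [PySem.List.foldl_append_singleton, List.nil_append]
  have hkeys : (PySem.Dict.mk d).keys = d.map Prod.fst := by
    simp [PySem.Dict.keys_mk]
  rw [hkeys, List.foldl_map]
  -- each category key looks up its own value
  have hlook : ∀ (ag : PySem.Dict String (List String)), ∀ cat ∈ d,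
      ((PySem.Dict.mk d).getD cat.1 []).foldl
        (fun ag par =>
          (if ag.contains par.1 then ag else ag.insert par.1 []).modify par.1 []
            (fun ds => ds ++ [par.2])) ag
      = cat.2.foldl
        (fun ag par => ag.modify par.1 [] (fun ds => ds ++ [par.2])) ag := by
    intro ag cat hcat
    have hv : (PySem.Dict.mk d).getD cat.1 [] = cat.2 := by
      have hmem : (cat.1, cat.2) ∈ (PySem.Dict.mk d).items := by simpa using hcat
      have : (PySem.Dict.mk d).keys.Nodup := by rwa [hkeys]
      exact PySem.Dict.getD_of_mem_items _ hmem this []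
    rw [hv]
    exact PySem.List.foldl_congr_mem _ _ _ _ (fun ag par _ => pvStepA_eq ag par)
  rw [PySem.List.foldl_congr_mem _ _ _ _ hlook, ← List.foldl_flatMap]
  -- now the grouping dict over the flat stream
  set L := d.flatMap Prod.snd with hL
  have hk : (L.foldl (fun ag (par : String × String) =>
      ag.modify par.1 [] (fun ds => ds ++ [par.2])) PySem.Dict.empty).keys
      = PySem.Set.ofList (L.map Prod.fst) := by
    rw [PySem.Dict.keys_foldl_modify_key L Prod.fst [] (fun _ par ds => ds ++ [par.2])]
    simp [PySem.Set.ofList_eq_foldl, PySem.Set.update, PySem.Dict.empty]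
  have hknd : (L.foldl (fun ag (par : String × String) =>
      ag.modify par.1 [] (fun ds => ds ++ [par.2])) PySem.Dict.empty).keys.Nodup := by
    exact PySem.Dict.nodup_keys_foldl_modify_key L Prod.fst [] (fun _ par ds => ds ++ [par.2])
      PySem.Dict.empty (by simp)
  rw [PySem.Dict.items_eq_map_keys _ hknd [], hk]
  refine List.map_congr_left (fun k _ => ?_)
  rw [PySem.Dict.getD_foldl_modify_append L PySem.Dict.empty k]
  simp

-- ===== VERDICT (by name: the statement is the Claim_ definition above) =====
theorem diccionarioAMatriz_spec : Claim_equal_diccionarioAMatriz := by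
  intro d _ hpre
  show diccionarioAMatriz d = diccionarioAMatriz_alt d
  rw [pvA_eq d hpre]
  rfl
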